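-- pv_equiv track=rewrite | github.com/goodfire-ai/spd | .circuits-ref/circuits/analysis.py | split_by_position
-- ===== SOURCE A (Python) =====
-- def split_by_position(
--     neurons: list[dict],
--     min_group_size: int = 3,
--     max_gap: int = 3
-- ) -> list[list[dict]]:
--     """Split neurons into contiguous token position spans.
--
--     Groups neurons by their token position, splitting when there's a gap
--     larger than max_gap between positions.
--
--     Args:
--         neurons: List of neuron dicts with 'position' field
--         min_group_size: Minimum neurons per group (smaller groups merged)
--         max_gap: Maximum gap between positions before splitting
--
--     Returns:
--         List of neuron groups, split by position gaps
--     """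
--     if not neurons:
--         return [neurons]
--
--     # Group neurons by position (convert to int for sorting)
--     pos_groups = {}
--     for n in neurons:
--         pos = n.get('position', 0)
--         # Convert position to int
--         if isinstance(pos, str):
--             try:
--                 pos = int(pos)
--             except ValueError:
--                 pos = 0
--         if pos not in pos_groups:
--             pos_groups[pos] = []
--         pos_groups[pos].append(n)
--
--     if len(pos_groups) <= 1:
--         return [neurons]
--
--     positions = sorted(pos_groups.keys())
--
--     # Split into contiguous spans based on gaps
--     spans = []
--     current_span = []
--     last_pos = None
--
--     for pos in positions:
--         if last_pos is None or pos - last_pos <= max_gap: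
--             current_span.extend(pos_groups[pos])
--         else:
--             # Gap exceeded - start new span
--             if current_span:
--                 spans.append(current_span)
--             current_span = pos_groups[pos].copy()
--         last_pos = pos
--
--     if current_span:
--         spans.append(current_span)
--
--     # Filter out tiny spans, merge them into neighbors
--     result = []
--     for span in spans:
--         if len(span) >= min_group_size:
--             result.append(span)
--         elif result:
--             # Merge tiny span into previous
--             result[-1].extend(span)
--         # else: will be merged into next span or dropped
--
--     return result if len(result) > 1 else [neurons]
-- ===== SOURCE B (Python) =====
-- def split_by_position(
--     neurons: list[dict],
--     min_group_size: int = 3,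
--     max_gap: int = 3
-- ) -> list[list[dict]]:
--     """Split neurons into contiguous token position spans.
--
--     Decorate-sort-chunk version: pair each neuron with its int position, stable
--     sort the pairs, cut the sorted list with two pointers wherever the position
--     jumps by more than max_gap, then collect each big-enough span together with
--     the tiny spans that follow it and flatten the collections.
--     """
--     if not neurons:
--         return [neurons]
--
--     def key(n):
--         p = n.get('position', 0)
--         if isinstance(p, str):
--             try:
--                 p = int(p)
--             except ValueError:
--                 p = 0
--         return p
--
--     keyed = sorted(((key(n), n) for n in neurons), key=lambda t: t[0])
--     if keyed[0][0] == keyed[-1][0]: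
--         # fewer than two distinct positions
--         return [neurons]
--
--     # Two-pointer chunking of the sorted pairs: a span ends where the position
--     # strictly increases by more than max_gap (equal positions never split).
--     spans = []
--     i = 0
--     while i < len(keyed):
--         j = i + 1
--         while j < len(keyed) and (keyed[j][0] == keyed[j - 1][0]
--                                   or keyed[j][0] - keyed[j - 1][0] <= max_gap):
--             j += 1
--         spans.append([n for _, n in keyed[i:j]])
--         i = j
--
--     # Each big span starts a collection; tiny spans join the previous
--     # collection (tiny spans before the first big one are dropped).
--     collections = []
--     for s in spans:
--         if len(s) >= min_group_size:
--             collections.append([s])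
--         elif collections:
--             collections[-1].append(s)
--
--     if len(collections) <= 1:
--         return [neurons]
--     return [sum(c, []) for c in collections]
-- ===== Notes on version B (the rewrite author's own statement) =====
-- stated objective: alternative
-- what changed: B replaces A's position-keyed dict grouping and loop over sorted distinct positions with a decorate-sort of (position, neuron) pairs, a first-key-vs-last-key test for the degenerate single-position case, two-pointer chunking of the sorted pairs at gaps, and a merge that collects each big span with its trailing tiny spans into nested collections that are flattened at the end.
import Mathlib
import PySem

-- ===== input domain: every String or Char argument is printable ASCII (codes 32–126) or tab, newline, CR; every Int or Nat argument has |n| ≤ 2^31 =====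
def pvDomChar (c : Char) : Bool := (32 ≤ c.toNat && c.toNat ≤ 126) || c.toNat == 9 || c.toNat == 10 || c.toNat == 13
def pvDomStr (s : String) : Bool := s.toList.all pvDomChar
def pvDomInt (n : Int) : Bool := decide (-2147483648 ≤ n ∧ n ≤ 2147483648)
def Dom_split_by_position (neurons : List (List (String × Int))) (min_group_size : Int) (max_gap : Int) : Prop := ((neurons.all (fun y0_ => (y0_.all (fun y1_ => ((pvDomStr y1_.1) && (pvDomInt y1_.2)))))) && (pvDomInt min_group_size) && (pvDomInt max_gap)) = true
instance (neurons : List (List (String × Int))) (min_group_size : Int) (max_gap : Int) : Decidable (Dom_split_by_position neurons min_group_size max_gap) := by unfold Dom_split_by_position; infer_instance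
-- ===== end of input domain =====

-- B replaces A's dict grouping + loop over sorted distinct positions by a decorate-sort of
-- (position, neuron) pairs, a first-vs-last key test, two-pointer chunking at gaps, and a
-- nested-collection merge flattened at the end (objective: alternative decomposition).

-- ===== PORT A =====
-- pos = n.get('position', 0); under the type convention values are Int, so the
-- 'isinstance(pos, str)' branch is dead code and is omitted (exact on this domain).
def pvPosA (n : List (String × Int)) : Int := PySem.Dict.getD ⟨n⟩ "position" 0

-- the grouping loop body of A ('for n in neurons')
def pvGroupStep (d : PySem.Dict Int (List (List (String × Int)))) (n : List (String × Int)) :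
    PySem.Dict Int (List (List (String × Int))) :=
  let pos := pvPosA n
  let d := if d.contains pos then d else d.insert pos []
  d.insert pos (d.getD pos [] ++ [n])

-- the span loop body of A ('for pos in positions')
def pvStepA (pg : PySem.Dict Int (List (List (String × Int)))) (max_gap : Int)
    (st : List (List (List (String × Int))) × List (List (String × Int)) × Option Int)
    (pos : Int) : List (List (List (String × Int))) × List (List (String × Int)) × Option Int :=
  match st with
  | (spans, current_span, last_pos) =>
    match last_pos with
    | none => (spans, current_span ++ pg.getD pos [], some pos)
    | some lp =>
        if pos - lp ≤ max_gap then (spans, current_span ++ pg.getD pos [], some pos)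
        else ((if current_span ≠ [] then spans ++ [current_span] else spans), pg.getD pos [], some pos)

-- the merge loop body of A ('for span in spans'); result[-1].extend(span) = replace the last element
def pvMerge (min_group_size : Int)
    (r : List (List (List (String × Int)))) (span : List (List (String × Int))) :
    List (List (List (String × Int))) :=
  if min_group_size ≤ (span.length : Int) then r ++ [span]
  else if r ≠ [] then r.dropLast ++ [r.getLastD [] ++ span] else r

def split_by_position (neurons : List (List (String × Int))) (min_group_size : Int) (max_gap : Int) : List (List (List (String × Int))) :=
  if neurons = [] then [neurons]
  else
    -- group neurons by position
    let pos_groups : PySem.Dict Int (List (List (String × Int))) :=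
      neurons.foldl pvGroupStep PySem.Dict.empty
    if pos_groups.size ≤ 1 then [neurons]
    else
      let positions := PySem.List.sorted pos_groups.keys (fun p => p) false
      let st := positions.foldl (pvStepA pos_groups max_gap) ([], [], none)
      let spans := if st.2.1 ≠ [] then st.1 ++ [st.2.1] else st.1
      let result := spans.foldl (pvMerge min_group_size) []
      if 1 < (result.length : Int) then result else [neurons]

-- ===== PORT B =====
-- B's key(n) (same 'position' → int rule as A; the isinstance-str branch is dead on Int values)
def pvKeyB (n : List (String × Int)) : Int := PySem.Dict.getD ⟨n⟩ "position" 0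

-- B's inner while loop: consume the run of sorted pairs connected to the previous
-- position p (equal position, or gap ≤ max_gap); return (its neurons, the rest)
def pvRun (mg p : Int) : List (Int × List (String × Int)) →
    List (List (String × Int)) × List (Int × List (String × Int))
  | [] => ([], [])
  | t :: rest =>
      if t.1 == p || decide (t.1 - p ≤ mg) then
        ((pvRun mg t.1 rest).1.cons t.2, (pvRun mg t.1 rest).2)
      else ([], t :: rest)

-- needed by pvChunks's termination argument
theorem pvRun_rest_le (mg : Int) : ∀ (p : Int) (l : List (Int × List (String × Int))),
    (pvRun mg p l).2.length ≤ l.length := by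
  intro p l
  induction l generalizing p with
  | nil => simp [pvRun]
  | cons t rest ih =>
      simp only [pvRun]
      split
      · exact Nat.le_succ_of_le (ih t.1)
      · simp

-- B's outer while loop: chop the sorted (position, neuron) list into spans
def pvChunks (mg : Int) : List (Int × List (String × Int)) → List (List (List (String × Int)))
  | [] => []
  | t :: rest =>
      (t.2 :: (pvRun mg t.1 rest).1) :: pvChunks mg (pvRun mg t.1 rest).2
  termination_by l => l.length
  decreasing_by simpa using Nat.lt_succ_of_le (pvRun_rest_le mg t.1 rest)

-- B's collection loop: a big span opens a collection, a tiny span joins the last one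
def pvCollect (min_group_size : Int)
    (g : List (List (List (List (String × Int))))) (s : List (List (String × Int))) :
    List (List (List (List (String × Int)))) :=
  if min_group_size ≤ (s.length : Int) then g ++ [[s]]
  else if g ≠ [] then g.dropLast ++ [g.getLastD [] ++ [s]] else g

def split_by_position_alt (neurons : List (List (String × Int))) (min_group_size : Int) (max_gap : Int) : List (List (List (String × Int))) :=
  if neurons = [] then [neurons]
  else
    let keyed := PySem.List.sorted (neurons.map (fun n => (pvKeyB n, n))) (fun t => t.1) false
    -- keyed is nonempty here, so keyed[0] / keyed[-1] are its head / last (exact)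
    if (keyed.headD (0, [])).1 == (keyed.getLastD (0, [])).1 then [neurons]
    else
      let spans := pvChunks max_gap keyed
      let collections := spans.foldl (pvCollect min_group_size) []
      if (collections.length : Int) ≤ 1 then [neurons]
      else collections.map (fun c => c.foldl (· ++ ·) [])

-- ===== PRECONDITION & SPEC =====
def Spec_split_by_position (neurons : List (List (String × Int))) (min_group_size : Int) (max_gap : Int) (out : List (List (List (String × Int)))) : Prop := out = split_by_position_alt neurons min_group_size max_gap
instance (neurons : List (List (String × Int))) (min_group_size : Int) (max_gap : Int) (out : List (List (List (String × Int)))) : Decidable (Spec_split_by_position neurons min_group_size max_gap out) := by unfold Spec_split_by_position; infer_instance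

-- ===== CLAIM (what is proved, stated in full; the proofs are below) =====
def Claim_equal_split_by_position : Prop := ∀ (neurons : List (List (String × Int))) (min_group_size : Int) (max_gap : Int), Dom_split_by_position neurons min_group_size max_gap → Spec_split_by_position neurons min_group_size max_gap (split_by_position neurons min_group_size max_gap)

-- ===== LEMMAS AND PROOFS =====

-- the two position keys are the same function
theorem pvKeyB_eq_pvPosA : pvKeyB = pvPosA := rfl

-- a per-neuron scan over the key-sorted neuron list (proof-side normal form of the span
-- computation; both A's per-position loop and B's chunking reduce to it)
def pvStepB (mg : Int)
    (st : List (List (List (String × Int))) × List (List (String × Int)) × Option Int)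
    (n : List (String × Int)) : List (List (List (String × Int))) × List (List (String × Int)) × Option Int :=
  match st with
  | (spans, cur, prev) =>
    let p := pvKeyB n
    match prev with
    | none => (spans, cur ++ [n], some p)
    | some pv =>
        if cur ≠ [] ∧ p ≠ pv ∧ mg < p - pv then (spans ++ [cur], [n], some p)
        else (spans, cur ++ [n], some p)

def pvFinish (st : List (List (List (String × Int))) × List (List (String × Int)) × Option Int) :
    List (List (List (String × Int))) := st.1 ++ [st.2.1]

def pvFlat (c : List (List (List (String × Int)))) : List (List (String × Int)) :=
  c.foldl (· ++ ·) []

-- the grouped, position-ordered arrangement of xs: for each position (in order) its neurons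
def pvCanon (ps : List Int) (xs : List (List (String × Int))) : List (List (String × Int)) :=
  ps.flatMap (fun p => xs.filter (fun n => pvPosA n == p))

-- the sorted distinct positions of xs
def pvSK (xs : List (List (String × Int))) : List Int :=
  PySem.List.sorted (PySem.Set.ofList (xs.map pvPosA)) (fun x => x) false

-- A's grouping step is a dict 'modify'
theorem pvGroupStep_eq_modify :
    pvGroupStep = fun d n => d.modify (pvPosA n) [] (fun v => v ++ [n]) := by
  funext d n
  simp only [pvGroupStep, PySem.Dict.modify]
  by_cases h : d.contains (pvPosA n) = true
  · simp [h]
  · simp only [Bool.not_eq_true] at h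
    simp [h, PySem.Dict.getD_insert_self, PySem.Dict.insert_insert_self,
      PySem.Dict.getD_of_not_contains d _ h]

theorem pv_insertBy_front {α : Type} (before : α → α → Bool) (x : α) (l : List α)
    (h : ∀ y ∈ l, before x y = true) :
    PySem.List.insertBy before x l = x :: l := by
  cases l with
  | nil => rfl
  | cons y ys => rw [PySem.List.insertBy.eq_2, h y (List.mem_cons_self)]; simp

theorem pv_insertBy_skip {α : Type} (before : α → α → Bool) (x : α) (l1 l2 : List α)
    (h : ∀ y ∈ l1, before x y = false) :
    PySem.List.insertBy before x (l1 ++ l2) = l1 ++ PySem.List.insertBy before x l2 := by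
  induction l1 with
  | nil => rfl
  | cons y ys ih =>
      rw [List.cons_append, PySem.List.insertBy.eq_2, h y (List.mem_cons_self)]
      simp only [Bool.false_eq_true, if_false, List.cons_append, List.cons.injEq, true_and]
      exact ih (fun z hz => h z (List.mem_cons_of_mem _ hz))

theorem pv_insertBy_pairwise_lt (ps : List Int) (q : Int)
    (hp : ps.Pairwise (· < ·)) (hq : q ∉ ps) :
    (PySem.List.insertBy (fun a b => decide (a < b)) q ps).Pairwise (· < ·) := by
  induction ps with
  | nil => simp [PySem.List.insertBy]
  | cons p pt ih =>
      rw [PySem.List.insertBy.eq_2]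
      rcases List.pairwise_cons.mp hp with ⟨hall, htail⟩
      by_cases hlt : q < p
      · simp only [hlt, decide_true, if_true]
        exact List.pairwise_cons.mpr ⟨by
          intro z hz
          rcases List.mem_cons.mp hz with rfl | hz
          · exact hlt
          · exact lt_trans hlt (hall z hz), hp⟩
      · simp only [hlt, decide_false, Bool.false_eq_true, if_false]
        have hqp : p < q := lt_of_le_of_ne (not_lt.mp hlt) (fun e => hq (e ▸ List.mem_cons_self))
        refine List.pairwise_cons.mpr ⟨?_, ih htail (fun hm => hq (List.mem_cons_of_mem _ hm))⟩
        intro z hz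
        rcases (PySem.List.insertBy_mem_iff _ _ _ _).mp hz with rfl | hz
        · exact hqp
        · exact hall z hz

theorem pvCanon_cons (p : Int) (pt : List Int) (xs : List (List (String × Int))) :
    pvCanon (p :: pt) xs = xs.filter (fun n => pvPosA n == p) ++ pvCanon pt xs := rfl

theorem pvCanon_irrel (ps : List Int) (xs : List (List (String × Int))) (x : List (String × Int))
    (h : ∀ p ∈ ps, pvPosA x ≠ p) :
    pvCanon ps (xs ++ [x]) = pvCanon ps xs := by
  induction ps with
  | nil => rfl
  | cons p pt ih =>
      simp only [pvCanon, List.flatMap_cons] at *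
      rw [ih (fun p hp => h p (List.mem_cons_of_mem _ hp))]
      have : (pvPosA x == p) = false := beq_eq_false_iff_ne.mpr (h p List.mem_cons_self)
      simp [List.filter_append, this]

theorem pv_mem_canon_key (ps : List Int) (xs : List (List (String × Int))) (y : List (String × Int))
    (hy : y ∈ pvCanon ps xs) : pvPosA y ∈ ps := by
  simp only [pvCanon, List.mem_flatMap, List.mem_filter] at hy
  rcases hy with ⟨p, hp, _, hkey⟩
  exact (eq_of_beq hkey) ▸ hp

theorem pv_insertBy_canon (ps : List Int) (xs : List (List (String × Int))) (x : List (String × Int))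
    (h1 : ps.Pairwise (· < ·))
    (hne : ∀ p ∈ ps, xs.filter (fun n => pvPosA n == p) ≠ [])
    (hq : pvPosA x ∉ ps → xs.filter (fun n => pvPosA n == pvPosA x) = []) :
    PySem.List.insertBy (fun a b => decide (pvPosA a < pvPosA b)) x (pvCanon ps xs)
      = pvCanon (if pvPosA x ∈ ps then ps else PySem.List.insertBy (fun a b => decide (a < b)) (pvPosA x) ps) (xs ++ [x]) := by
  induction ps with
  | nil =>
      have hfil : xs.filter (fun n => pvPosA n == pvPosA x) = [] := hq (by simp)
      simp [pvCanon, PySem.List.insertBy, List.filter_append, hfil]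
  | cons p pt ih =>
      rcases List.pairwise_cons.mp h1 with ⟨hall, htail⟩
      have hGkey : ∀ y ∈ xs.filter (fun n => pvPosA n == p), pvPosA y = p := by
        intro y hy; exact eq_of_beq (List.mem_filter.mp hy).2
      rcases lt_trichotomy (pvPosA x) p with hlt | heq | hgt
      · -- new smallest position: x goes to the very front
        have hnotin : pvPosA x ∉ p :: pt := by
          intro hm
          rcases List.mem_cons.mp hm with e | hm
          · exact absurd e (ne_of_lt hlt)
          · exact absurd hlt (not_lt.mpr (le_of_lt (hall _ hm)))
        have hfront : ∀ y ∈ pvCanon (p :: pt) xs,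
            (fun a b => decide (pvPosA a < pvPosA b)) x y = true := by
          intro y hy
          have hk := pv_mem_canon_key _ _ _ hy
          simp only [decide_eq_true_eq]
          rcases List.mem_cons.mp hk with e | hm
          · rw [e]; exact hlt
          · exact lt_trans hlt (hall _ hm)
        rw [pv_insertBy_front _ _ _ hfront, if_neg hnotin, PySem.List.insertBy.eq_2]
        simp only [hlt, decide_true, if_true]
        rw [pvCanon_cons (pvPosA x) (p :: pt) (xs ++ [x]),
          pvCanon_irrel (p :: pt) xs x (fun p' hp' e => hnotin (e ▸ hp'))]
        simp [List.filter_append, hq hnotin]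
      · -- existing position: x goes to the end of its group
        have hmem : pvPosA x ∈ p :: pt := by rw [heq]; exact List.mem_cons_self
        rw [if_pos hmem, pvCanon_cons,
          pv_insertBy_skip _ _ _ _ (fun y hy => by
            simp only [decide_eq_false_iff_not, not_lt, hGkey y hy, heq, le_refl]),
          pv_insertBy_front _ _ _ (fun y hy => by
            have := hall _ (pv_mem_canon_key _ _ _ hy)
            simp only [decide_eq_true_eq]
            rw [heq]; exact this)]
        have hnotpt : ∀ p' ∈ pt, pvPosA x ≠ p' := by
          intro p' hp' e
          exact absurd (heq ▸ hall _ hp') (e ▸ lt_irrefl _)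
        rw [pvCanon_cons, pvCanon_irrel pt xs x hnotpt]
        have hxp : (pvPosA x == p) = true := beq_iff_eq.mpr heq
        simp [List.filter_append, hxp]
      · -- x's position is past p: skip p's group and recurse
        have hqnep : pvPosA x ≠ p := ne_of_gt hgt
        rw [pvCanon_cons,
          pv_insertBy_skip _ _ _ _ (fun y hy => by
            simp only [decide_eq_false_iff_not, not_lt, hGkey y hy]
            exact le_of_lt hgt),
          ih htail (fun p' hp' => hne p' (List.mem_cons_of_mem _ hp'))
            (fun hnm => hq (by
              intro hm
              rcases List.mem_cons.mp hm with e | hm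
              · exact hqnep e
              · exact hnm hm))]
        have hxp : (pvPosA x == p) = false := beq_eq_false_iff_ne.mpr hqnep
        by_cases hmem : pvPosA x ∈ pt
        · rw [if_pos hmem, if_pos (List.mem_cons_of_mem _ hmem), pvCanon_cons]
          simp [List.filter_append, hxp]
        · have hnotin : pvPosA x ∉ p :: pt := by
            intro hm
            rcases List.mem_cons.mp hm with e | hm
            · exact hqnep e
            · exact hmem hm
          rw [if_neg hmem, if_neg hnotin, PySem.List.insertBy.eq_2]
          simp only [decide_eq_true_eq, not_lt.mpr (le_of_lt hgt), if_false]
          rw [pvCanon_cons]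
          simp [List.filter_append, hxp]

-- stability of Python's sort: sorting by position = concatenating the position groups in sorted order
theorem pv_sorted_eq_canon (xs : List (List (String × Int))) :
    PySem.List.sorted xs pvPosA false = pvCanon (pvSK xs) xs := by
  induction xs using List.reverseRecOn with
  | nil => rfl
  | append_singleton xs x ih =>
      have hfold := PySem.List.sorted_eq_foldl_insertBy (xs ++ [x]) pvPosA
      rw [List.foldl_append] at hfold
      rw [hfold, List.foldl_cons, List.foldl_nil,
        ← PySem.List.sorted_eq_foldl_insertBy xs pvPosA, ih]
      have h1 := PySem.List.sorted_ofList_pairwise_lt (xs.map pvPosA)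
      rw [pv_insertBy_canon (pvSK xs) xs x h1 ?hne ?hq]
      case hne =>
        intro p hp
        have hp' : p ∈ xs.map pvPosA :=
          (PySem.Set.mem_ofList _ _).mp ((PySem.List.mem_sorted _ _ _ _).mp hp)
        rcases List.mem_map.mp hp' with ⟨n, hn, rfl⟩
        exact List.ne_nil_of_mem (List.mem_filter.mpr ⟨hn, beq_iff_eq.mpr rfl⟩)
      case hq =>
        intro hnm
        refine List.filter_eq_nil_iff.mpr ?_
        intro n hn hbeq
        exact hnm ((PySem.List.mem_sorted _ _ _ _).mpr
          ((PySem.Set.mem_ofList _ _).mpr (List.mem_map.mpr ⟨n, hn, eq_of_beq hbeq⟩)))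
      -- the updated sorted key list is exactly pvSK (xs ++ [x])
      have hmapp : (xs ++ [x]).map pvPosA = xs.map pvPosA ++ [pvPosA x] := by
        simp
      have hofl : PySem.Set.ofList ((xs ++ [x]).map pvPosA)
          = PySem.Set.add (PySem.Set.ofList (xs.map pvPosA)) (pvPosA x) := by
        rw [hmapp]
        simp [PySem.Set.ofList, PySem.Set.add, List.foldl_append]
      by_cases hm : pvPosA x ∈ pvSK xs
      · have hmem : pvPosA x ∈ PySem.Set.ofList (xs.map pvPosA) :=
          (PySem.List.mem_sorted _ _ _ _).mp hm
        have hcont : (PySem.Set.ofList (xs.map pvPosA)).contains (pvPosA x) = true := by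
          exact List.elem_eq_true_of_mem hmem
        have : pvSK (xs ++ [x]) = pvSK xs := by
          unfold pvSK
          rw [hofl]
          simp only [PySem.Set.add, hcont, if_true]
        rw [if_pos hm, this]
      · have hmem : pvPosA x ∉ PySem.Set.ofList (xs.map pvPosA) := fun hc =>
          hm ((PySem.List.mem_sorted _ _ _ _).mpr hc)
        have hcont : (PySem.Set.ofList (xs.map pvPosA)).contains (pvPosA x) = false := by
          cases hc : (PySem.Set.ofList (xs.map pvPosA)).contains (pvPosA x) with
          | false => rfl
          | true => exact absurd (List.mem_of_elem_eq_true hc) hmem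
        have hadd : PySem.Set.add (PySem.Set.ofList (xs.map pvPosA)) (pvPosA x)
            = PySem.Set.ofList (xs.map pvPosA) ++ [pvPosA x] := by
          simp only [PySem.Set.add, hcont, Bool.false_eq_true, if_false]
        have hperm : (PySem.List.insertBy (fun a b => decide (a < b)) (pvPosA x) (pvSK xs)).Perm
            (PySem.Set.ofList (xs.map pvPosA) ++ [pvPosA x]) := by
          refine (PySem.List.insertBy_perm _ _ _).trans ?_
          refine (List.Perm.cons _ (PySem.List.sorted_perm _ _ _)).trans ?_
          exact (List.perm_append_singleton _ _).symm
        have : pvSK (xs ++ [x])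
            = PySem.List.insertBy (fun a b => decide (a < b)) (pvPosA x) (pvSK xs) := by
          unfold pvSK
          rw [hofl, hadd]
          exact PySem.List.sorted_eq_of_perm_of_pairwise_lt _ _ _ hperm
            (pv_insertBy_pairwise_lt _ _ h1 hm)
        rw [if_neg hm, this]

-- the scan within one position group only appends
theorem pv_stepB_group (mg : Int) (g : List (List (String × Int))) (p : Int)
    (hg : ∀ n ∈ g, pvPosA n = p) :
    ∀ spans cur, g.foldl (pvStepB mg) (spans, cur, some p) = (spans, cur ++ g, some p) := by
  induction g with
  | nil => intro spans cur; simp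
  | cons n g' ih =>
      intro spans cur
      have hn : pvKeyB n = p := by rw [pvKeyB_eq_pvPosA]; exact hg n List.mem_cons_self
      rw [List.foldl_cons]
      have hstep : pvStepB mg (spans, cur, some p) n = (spans, cur ++ [n], some p) := by
        simp [pvStepB, hn]
      rw [hstep, ih (fun m hm => hg m (List.mem_cons_of_mem _ hm)) spans (cur ++ [n])]
      simp

-- the per-neuron scan over the grouped list agrees with A's per-position span loop
theorem pv_stepB_eq_stepA (pg : PySem.Dict Int (List (List (String × Int)))) (mg : Int) :
    ∀ (ps : List Int), ps.Pairwise (· < ·) →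
    (∀ p ∈ ps, pg.getD p [] ≠ []) →
    (∀ p ∈ ps, ∀ n ∈ pg.getD p [], pvPosA n = p) →
    ∀ (spans : List (List (List (String × Int)))) (cur : List (List (String × Int))) (lp : Int),
    (∀ p ∈ ps, lp < p) → cur ≠ [] →
    (ps.flatMap (fun p => pg.getD p [])).foldl (pvStepB mg) (spans, cur, some lp)
      = ps.foldl (pvStepA pg mg) (spans, cur, some lp) := by
  intro ps
  induction ps with
  | nil => intro _ _ _ spans cur lp _ _; rfl
  | cons p pt ih =>
      intro hpw hne hkey spans cur lp hlt hcur
      rcases List.pairwise_cons.mp hpw with ⟨hall, htail⟩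
      obtain ⟨m, g', hg⟩ : ∃ m g', pg.getD p [] = m :: g' := by
        cases hG : pg.getD p [] with
        | nil => exact absurd hG (hne p List.mem_cons_self)
        | cons a b => exact ⟨a, b, rfl⟩
      have hkeyp : ∀ n ∈ pg.getD p [], pvPosA n = p := hkey p List.mem_cons_self
      have hlp : lp < p := hlt p List.mem_cons_self
      have hm : pvKeyB m = p := by
        rw [pvKeyB_eq_pvPosA]; exact hkeyp m (hg ▸ List.mem_cons_self)
      have hgkey' : ∀ n ∈ g', pvPosA n = p := fun n hn =>
        hkeyp n (hg ▸ List.mem_cons_of_mem _ hn)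
      have hgB : (pg.getD p []).foldl (pvStepB mg) (spans, cur, some lp)
          = pvStepA pg mg (spans, cur, some lp) p := by
        rw [hg, List.foldl_cons]
        by_cases hsplit : mg < p - lp
        · have hstep : pvStepB mg (spans, cur, some lp) m = (spans ++ [cur], [m], some p) := by
            simp [pvStepB, hm, hcur, ne_of_gt hlp, hsplit]
          rw [hstep, pv_stepB_group mg g' p hgkey']
          simp [pvStepA, not_le.mpr hsplit, hcur, hg]
        · have hstep : pvStepB mg (spans, cur, some lp) m = (spans, cur ++ [m], some p) := by
            simp [pvStepB, hm, hsplit]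
          rw [hstep, pv_stepB_group mg g' p hgkey']
          simp [pvStepA, not_lt.mp hsplit, hg]
      rw [List.flatMap_cons, List.foldl_append, hgB, List.foldl_cons]
      have hne' : ∀ q ∈ pt, pg.getD q [] ≠ [] := fun q hq => hne q (List.mem_cons_of_mem _ hq)
      have hkey' : ∀ q ∈ pt, ∀ n ∈ pg.getD q [], pvPosA n = q := fun q hq =>
        hkey q (List.mem_cons_of_mem _ hq)
      by_cases hsplit : p - lp ≤ mg
      · have hA : pvStepA pg mg (spans, cur, some lp) p = (spans, cur ++ pg.getD p [], some p) := by
          simp [pvStepA, hsplit]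
        rw [hA]
        exact ih htail hne' hkey' _ _ p hall (by simp [hg])
      · have hA : pvStepA pg mg (spans, cur, some lp) p
            = (spans ++ [cur], pg.getD p [], some p) := by
          simp [pvStepA, hsplit, hcur]
        rw [hA]
        exact ih htail hne' hkey' _ _ p hall (by simp [hg])

-- A's span loop keeps the current span nonempty
theorem pv_stepA_cur_ne (pg : PySem.Dict Int (List (List (String × Int)))) (mg : Int) :
    ∀ (ps : List Int), (∀ p ∈ ps, pg.getD p [] ≠ []) →
    ∀ spans cur (lp : Int), cur ≠ [] →
    (ps.foldl (pvStepA pg mg) (spans, cur, some lp)).2.1 ≠ [] := by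
  intro ps
  induction ps with
  | nil => intro _ spans cur lp hcur; exact hcur
  | cons p pt ih =>
      intro hne spans cur lp hcur
      rw [List.foldl_cons]
      have hne' : ∀ q ∈ pt, pg.getD q [] ≠ [] := fun q hq => hne q (List.mem_cons_of_mem _ hq)
      have hGp := hne p List.mem_cons_self
      by_cases hsplit : p - lp ≤ mg
      · have hA : pvStepA pg mg (spans, cur, some lp) p = (spans, cur ++ pg.getD p [], some p) := by
          simp [pvStepA, hsplit]
        rw [hA]
        exact ih hne' _ _ p (by simp [hGp])
      · have hA : pvStepA pg mg (spans, cur, some lp) p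
            = (spans ++ [cur], pg.getD p [], some p) := by
          simp [pvStepA, hsplit, hcur]
        rw [hA]
        exact ih hne' _ _ p hGp

-- the dict built by A's grouping loop: its keys and its per-position lists
theorem pv_keys (neurons : List (List (String × Int))) :
    (neurons.foldl (fun d n => d.modify (pvPosA n) [] (fun v => v ++ [n])) PySem.Dict.empty).keys
      = PySem.Set.ofList (neurons.map pvPosA) := by
  have h := PySem.Dict.keys_foldl_modify_key (ν := List (List (String × Int)))
    neurons pvPosA [] (fun _ n => (· ++ [n])) PySem.Dict.empty
  simpa using h

theorem pv_getD (neurons : List (List (String × Int))) (p : Int) :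
    (neurons.foldl (fun d n => d.modify (pvPosA n) [] (fun v => v ++ [n])) PySem.Dict.empty).getD p []
      = neurons.filter (fun n => pvPosA n == p) := by
  have h := PySem.Dict.getD_foldl_modify_append
    (neurons.map (fun n => (pvPosA n, n))) PySem.Dict.empty p
  rw [List.foldl_map] at h
  simpa [List.filter_map, List.map_map, Function.comp_def] using h

-- ----- bridges between B's port and the proof-side scan -----

-- decorate-sort: sorting the (key, neuron) pairs by first component is the stable
-- key-sort of the neurons, decorated
theorem pv_insertBy_dec (x : List (String × Int)) (l : List (List (String × Int))) :
    PySem.List.insertBy (fun a b => decide (a.1 < b.1)) (pvKeyB x, x)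
        (l.map (fun n => (pvKeyB n, n)))
      = (PySem.List.insertBy (fun a b => decide (pvKeyB a < pvKeyB b)) x l).map
          (fun n => (pvKeyB n, n)) := by
  induction l with
  | nil => rfl
  | cons y ys ih =>
      simp only [List.map_cons, PySem.List.insertBy.eq_2]
      by_cases h : pvKeyB x < pvKeyB y
      · simp [h]
      · simp [h, ih]

theorem pv_sorted_map_dec (xs : List (List (String × Int))) :
    PySem.List.sorted (xs.map (fun n => (pvKeyB n, n))) (fun t => t.1) false
      = (PySem.List.sorted xs pvKeyB false).map (fun n => (pvKeyB n, n)) := by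
  rw [PySem.List.sorted_eq_foldl_insertBy, PySem.List.sorted_eq_foldl_insertBy, List.foldl_map]
  suffices h : ∀ (ys : List (List (String × Int))) (acc : List (List (String × Int))),
      ys.foldl (fun acc x => PySem.List.insertBy (fun a b => decide (a.1 < b.1)) (pvKeyB x, x) acc)
          (acc.map (fun n => (pvKeyB n, n)))
        = (ys.foldl (fun acc x => PySem.List.insertBy (fun a b => decide (pvKeyB a < pvKeyB b)) x acc) acc).map
            (fun n => (pvKeyB n, n)) by
    simpa using h xs []
  intro ys
  induction ys with
  | nil => intro acc; rfl
  | cons y ys ih =>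
      intro acc
      simp only [List.foldl_cons]
      rw [pv_insertBy_dec, ih]

-- B's two-pointer chunking of the decorated list = the proof-side scan, finished
theorem pv_chunk_scan (mg : Int) :
    ∀ (l : List (List (String × Int))) (p : Int)
      (cur : List (List (String × Int))) (spans : List (List (List (String × Int)))),
    cur ≠ [] →
    spans ++ (cur ++ (pvRun mg p (l.map (fun n => (pvKeyB n, n)))).1)
        :: pvChunks mg (pvRun mg p (l.map (fun n => (pvKeyB n, n)))).2
      = pvFinish (l.foldl (pvStepB mg) (spans, cur, some p)) := by
  intro l
  induction l with
  | nil => intro p cur spans _; simp [pvRun, pvChunks, pvFinish]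
  | cons n l' ih =>
      intro p cur spans hcur
      simp only [List.map_cons, List.foldl_cons]
      by_cases hc : pvKeyB n = p ∨ pvKeyB n - p ≤ mg
      · have hrun : pvRun mg p ((pvKeyB n, n) :: l'.map (fun n => (pvKeyB n, n)))
            = ((pvRun mg (pvKeyB n) (l'.map (fun n => (pvKeyB n, n)))).1.cons n,
               (pvRun mg (pvKeyB n) (l'.map (fun n => (pvKeyB n, n)))).2) := by
          have hb : (((pvKeyB n, n).1 == p || decide ((pvKeyB n, n).1 - p ≤ mg))) = true := by
            simp only [Bool.or_eq_true, beq_iff_eq, decide_eq_true_eq]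
            exact hc
          rw [pvRun.eq_2, hb]
          simp
        have hstep : pvStepB mg (spans, cur, some p) n = (spans, cur ++ [n], some (pvKeyB n)) := by
          have : ¬ (cur ≠ [] ∧ pvKeyB n ≠ p ∧ mg < pvKeyB n - p) := by
            rcases hc with h | h
            · exact fun ⟨_, h2, _⟩ => h2 h
            · exact fun ⟨_, _, h3⟩ => absurd h (not_le.mpr h3)
          simp [pvStepB, this]
        rw [hrun, hstep, ← ih (pvKeyB n) (cur ++ [n]) spans (by simp)]
        simp
      · rcases not_or.mp hc with ⟨h1, h2⟩
        have hbool : (((pvKeyB n, n).1 == p || decide ((pvKeyB n, n).1 - p ≤ mg))) = false := by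
          simp only [Bool.or_eq_false_iff, beq_eq_false_iff_ne, ne_eq, decide_eq_false_iff_not]
          exact ⟨h1, h2⟩
        have hrun : pvRun mg p ((pvKeyB n, n) :: l'.map (fun n => (pvKeyB n, n)))
            = ([], (pvKeyB n, n) :: l'.map (fun n => (pvKeyB n, n))) := by
          rw [pvRun.eq_2, hbool]
          simp
        have hstep : pvStepB mg (spans, cur, some p) n = (spans ++ [cur], [n], some (pvKeyB n)) := by
          have hgap : mg < pvKeyB n - p := lt_of_not_ge h2
          simp [pvStepB, hcur, h1, hgap]
        rw [hrun, hstep, ← ih (pvKeyB n) [n] (spans ++ [cur]) (by simp)]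
        rw [pvChunks]
        simp

theorem pv_chunks_eq_finish (mg : Int) (l : List (List (String × Int))) (hl : l ≠ []) :
    pvChunks mg (l.map (fun n => (pvKeyB n, n)))
      = pvFinish (l.foldl (pvStepB mg) ([], [], none)) := by
  obtain ⟨n, l', rfl⟩ := List.exists_cons_of_ne_nil hl
  simp only [List.map_cons, List.foldl_cons]
  have hstep : pvStepB mg ([], [], none) n = ([], [n], some (pvKeyB n)) := by
    simp [pvStepB]
  rw [pvChunks, hstep, ← pv_chunk_scan mg l' (pvKeyB n) [n] [] (by simp)]
  simp

-- the flat length-≤-1 test: the distinct keys of a nonempty list number at most one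
-- iff all its keys are equal
theorem pv_ofList_const (c : Int) :
    ∀ (ks : List Int), (∀ x ∈ ks, x = c) → List.foldl PySem.Set.add [c] ks = [c] := by
  intro ks
  induction ks with
  | nil => intro _; rfl
  | cons k kt ih =>
      intro h
      have hk : k = c := h k List.mem_cons_self
      have : PySem.Set.add [c] k = [c] := by
        subst hk
        simp [PySem.Set.add, List.contains_eq_mem]
      rw [List.foldl_cons, this, ih (fun x hx => h x (List.mem_cons_of_mem _ hx))]

theorem pv_len_le_one_iff (ks : List Int) (hks : ks ≠ []) :
    (PySem.Set.ofList ks).length ≤ 1 ↔ ∀ a ∈ ks, ∀ b ∈ ks, a = b := by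
  constructor
  · intro hlen a ha b hb
    have ha' : a ∈ PySem.Set.ofList ks := (PySem.Set.mem_ofList _ _).mpr ha
    have hb' : b ∈ PySem.Set.ofList ks := (PySem.Set.mem_ofList _ _).mpr hb
    match h : PySem.Set.ofList ks with
    | [] => rw [h] at ha'; exact absurd ha' (List.not_mem_nil)
    | [x] =>
        rw [h] at ha' hb'
        simp only [List.mem_singleton] at ha' hb'
        rw [ha', hb']
    | x :: y :: t => rw [h] at hlen; simp at hlen
  · intro hall
    obtain ⟨c, kt, rfl⟩ := List.exists_cons_of_ne_nil hks
    have h0 : PySem.Set.ofList (c :: kt) = List.foldl PySem.Set.add [c] kt := by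
      simp [PySem.Set.ofList, PySem.Set.add]
    rw [h0, pv_ofList_const c kt (fun x hx =>
      hall x (List.mem_cons_of_mem _ hx) c List.mem_cons_self)]
    simp

-- B's first-key = last-key test on the sorted list ↔ A's distinct-position count ≤ 1
theorem pv_check_iff (neurons : List (List (String × Int))) (hne : neurons ≠ []) :
    ((((PySem.List.sorted (neurons.map (fun n => (pvKeyB n, n))) (fun t => t.1) false).headD (0, [])).1)
        == (((PySem.List.sorted (neurons.map (fun n => (pvKeyB n, n))) (fun t => t.1) false).getLastD (0, [])).1)) = true
      ↔ (PySem.Set.ofList (neurons.map pvPosA)).length ≤ 1 := by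
  rw [pv_sorted_map_dec]
  have hsne : PySem.List.sorted neurons pvKeyB false ≠ [] := by
    rw [Ne, PySem.List.sorted_eq_nil_iff]
    exact hne
  obtain ⟨h0, t0, hcons⟩ := List.exists_cons_of_ne_nil hsne
  obtain ⟨s', a, hconcat⟩ :=
    (List.eq_nil_or_concat (PySem.List.sorted neurons pvKeyB false)).resolve_left hsne
  rw [List.concat_eq_append] at hconcat
  have hpw := PySem.List.sorted_pairwise neurons pvKeyB
  have hhead : ((List.map (fun n => (pvKeyB n, n)) (PySem.List.sorted neurons pvKeyB false)).headD (0, [])).1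
      = pvKeyB h0 := by
    rw [hcons]; rfl
  have hlast : ((List.map (fun n => (pvKeyB n, n)) (PySem.List.sorted neurons pvKeyB false)).getLastD (0, [])).1
      = pvKeyB a := by
    rw [hconcat, List.map_append, List.map_cons, List.map_nil, List.getLastD_concat]
  rw [hhead, hlast, beq_iff_eq]
  have hub : ∀ z ∈ neurons, pvKeyB z ≤ pvKeyB a := by
    intro z hz
    have hzs : z ∈ PySem.List.sorted neurons pvKeyB false :=
      (PySem.List.mem_sorted _ _ _ _).mpr hz
    rw [hconcat] at hzs
    rcases List.mem_append.mp hzs with hz' | hz'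
    · have hpw' := hpw
      rw [hconcat] at hpw'
      rcases List.pairwise_append.mp hpw' with ⟨_, _, hcross⟩
      exact hcross z hz' a (List.mem_singleton.mpr rfl)
    · rw [List.mem_singleton.mp hz']
  have hlb : ∀ z ∈ neurons, pvKeyB h0 ≤ pvKeyB z := by
    intro z hz
    have hzs : z ∈ PySem.List.sorted neurons pvKeyB false :=
      (PySem.List.mem_sorted _ _ _ _).mpr hz
    rw [hcons] at hzs
    have hpw' := hpw
    rw [hcons] at hpw'
    rcases List.mem_cons.mp hzs with rfl | hz'
    · exact le_refl _
    · exact (List.pairwise_cons.mp hpw').1 z hz'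
  have hh0mem : h0 ∈ neurons := by
    have : h0 ∈ PySem.List.sorted neurons pvKeyB false := hcons ▸ List.mem_cons_self
    exact (PySem.List.mem_sorted _ _ _ _).mp this
  have hamem : a ∈ neurons := by
    have : a ∈ PySem.List.sorted neurons pvKeyB false := hconcat ▸ (by simp)
    exact (PySem.List.mem_sorted _ _ _ _).mp this
  rw [pv_len_le_one_iff _ (by simp [hne])]
  constructor
  · intro heq x hx y hy
    rcases List.mem_map.mp hx with ⟨nx, hnx, rfl⟩
    rcases List.mem_map.mp hy with ⟨ny, hny, rfl⟩
    have e1 : pvKeyB nx = pvKeyB h0 :=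
      le_antisymm (by rw [heq]; exact hub nx hnx) (hlb nx hnx)
    have e2 : pvKeyB ny = pvKeyB h0 :=
      le_antisymm (by rw [heq]; exact hub ny hny) (hlb ny hny)
    show pvKeyB nx = pvKeyB ny
    rw [e1, e2]
  · intro hall
    exact hall (pvKeyB h0) (List.mem_map.mpr ⟨h0, hh0mem, rfl⟩)
      (pvKeyB a) (List.mem_map.mpr ⟨a, hamem, rfl⟩)

-- A's flat merge is the flattening of B's nested-collection merge
theorem pv_merge_step (mgs : Int) (g : List (List (List (List (String × Int)))))
    (s : List (List (String × Int))) :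
    pvMerge mgs (g.map pvFlat) s = (pvCollect mgs g s).map pvFlat := by
  unfold pvMerge pvCollect
  by_cases hbig : mgs ≤ (s.length : Int)
  · simp [hbig, pvFlat]
  · rcases List.eq_nil_or_concat g with rfl | ⟨g', a, rfl⟩
    · simp [hbig]
    · simp only [List.concat_eq_append]
      have hflat : pvFlat (a ++ [s]) = pvFlat a ++ s := by
        unfold pvFlat
        rw [List.foldl_append]
        simp
      simp [hbig, List.map_append, List.dropLast_concat, List.getLastD_concat, hflat]

theorem pv_merge_eq_map_flat (mgs : Int) :
    ∀ (spans : List (List (List (String × Int)))) (g : List (List (List (List (String × Int))))),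
    spans.foldl (pvMerge mgs) (g.map pvFlat) = (spans.foldl (pvCollect mgs) g).map pvFlat := by
  intro spans
  induction spans with
  | nil => intro g; rfl
  | cons s st ih =>
      intro g
      rw [List.foldl_cons, List.foldl_cons, pv_merge_step, ih]

-- the main equality
theorem split_by_position_main : ∀ (neurons : List (List (String × Int))) (min_group_size max_gap : Int),
    split_by_position neurons min_group_size max_gap = split_by_position_alt neurons min_group_size max_gap := by
  intro neurons mgs mg
  by_cases hnil : neurons = []
  · simp [split_by_position, split_by_position_alt, hnil]
  · simp only [split_by_position, split_by_position_alt, if_neg hnil, pvGroupStep_eq_modify]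
    set pgm := neurons.foldl (fun d n => d.modify (pvPosA n) [] (fun v => v ++ [n]))
      PySem.Dict.empty with hpgm
    have hkeys : pgm.keys = PySem.Set.ofList (neurons.map pvPosA) := pv_keys neurons
    have hsize : pgm.size = (PySem.Set.ofList (neurons.map pvPosA)).length := by
      rw [← hkeys]; simp [PySem.Dict.size, PySem.Dict.keys]
    have hcheck := pv_check_iff neurons hnil
    by_cases hle : (PySem.Set.ofList (neurons.map pvPosA)).length ≤ 1
    · have hcondA : pgm.size ≤ 1 := by rw [hsize]; exact hle
      have hcondB : ((((PySem.List.sorted (neurons.map (fun n => (pvKeyB n, n))) (fun t => t.1) false).headD (0, [])).1)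
          == (((PySem.List.sorted (neurons.map (fun n => (pvKeyB n, n))) (fun t => t.1) false).getLastD (0, [])).1)) = true :=
        hcheck.mpr hle
      rw [if_pos hcondA, if_pos hcondB]
    · have hcondA : ¬ pgm.size ≤ 1 := by rw [hsize]; exact hle
      have hcondB : ¬ ((((PySem.List.sorted (neurons.map (fun n => (pvKeyB n, n))) (fun t => t.1) false).headD (0, [])).1)
          == (((PySem.List.sorted (neurons.map (fun n => (pvKeyB n, n))) (fun t => t.1) false).getLastD (0, [])).1)) = true :=
        fun hc => hle (hcheck.mp hc)
      rw [if_neg hcondA, if_neg hcondB]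
      -- both sides now run their span computations; show the span lists agree
      have hpw := PySem.List.sorted_ofList_pairwise_lt (neurons.map pvPosA)
      have hGne : ∀ p ∈ pvSK neurons, pgm.getD p [] ≠ [] := by
        intro p hp
        rw [pv_getD]
        have hp' : p ∈ neurons.map pvPosA :=
          (PySem.Set.mem_ofList _ _).mp ((PySem.List.mem_sorted _ _ _ _).mp hp)
        rcases List.mem_map.mp hp' with ⟨n, hn, rfl⟩
        exact List.ne_nil_of_mem (List.mem_filter.mpr ⟨hn, beq_iff_eq.mpr rfl⟩)
      have hGkey : ∀ p ∈ pvSK neurons, ∀ n ∈ pgm.getD p [], pvPosA n = p := by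
        intro p _ n hn
        rw [pv_getD] at hn
        exact eq_of_beq (List.mem_filter.mp hn).2
      have hSKne : pvSK neurons ≠ [] := by
        obtain ⟨n, hn⟩ := List.exists_mem_of_ne_nil neurons hnil
        exact List.ne_nil_of_mem ((PySem.List.mem_sorted _ _ _ _).mpr
          ((PySem.Set.mem_ofList _ _).mpr (List.mem_map.mpr ⟨n, hn, rfl⟩)))
      obtain ⟨p0, pt, hSK⟩ := List.exists_cons_of_ne_nil hSKne
      have hpositions : PySem.List.sorted pgm.keys (fun p => p) false = pvSK neurons := by
        rw [hkeys]; rfl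
      have hsorted : PySem.List.sorted neurons pvPosA false
          = (pvSK neurons).flatMap (fun p => pgm.getD p []) := by
        rw [pv_sorted_eq_canon]
        unfold pvCanon
        simp only [hpgm, pv_getD]
      have hmemSK : ∀ q ∈ pt, q ∈ pvSK neurons := fun q hq => hSK ▸ List.mem_cons_of_mem _ hq
      have hp0SK : p0 ∈ pvSK neurons := hSK ▸ List.mem_cons_self
      have hpwSK : (pvSK neurons).Pairwise (· < ·) := hpw
      have hpt : pt.Pairwise (· < ·) ∧ ∀ q ∈ pt, p0 < q := by
        rw [hSK] at hpwSK
        rcases List.pairwise_cons.mp hpwSK with ⟨hall, htail⟩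
        exact ⟨htail, hall⟩
      obtain ⟨m, g', hg0⟩ : ∃ m g', pgm.getD p0 [] = m :: g' := by
        cases hG : pgm.getD p0 [] with
        | nil => exact absurd hG (hGne p0 hp0SK)
        | cons a b => exact ⟨a, b, rfl⟩
      have hm : pvPosA m = p0 := hGkey p0 hp0SK m (hg0 ▸ List.mem_cons_self)
      -- the proof-side scan over the key-sorted neurons equals A's per-position loop, finished
      have hBfold :
          ((p0 :: pt).flatMap (fun p => pgm.getD p [])).foldl (pvStepB mg) ([], [], none)
            = pt.foldl (pvStepA pgm mg) ([], pgm.getD p0 [], some p0) := by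
        rw [List.flatMap_cons, hg0, List.cons_append, List.foldl_cons]
        have hstep : pvStepB mg ([], [], none) m = ([], [m], some p0) := by
          simp [pvStepB, pvKeyB_eq_pvPosA, hm]
        rw [hstep, List.foldl_append,
          pv_stepB_group mg g' p0
            (fun n hn => hGkey p0 hp0SK n (hg0 ▸ List.mem_cons_of_mem _ hn)) [] [m]]
        have hback : ([m] : List (List (String × Int))) ++ g' = pgm.getD p0 [] := by
          rw [hg0]; rfl
        rw [hback, ← hg0]
        exact pv_stepB_eq_stepA pgm mg pt hpt.1
          (fun q hq => hGne q (hmemSK q hq))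
          (fun q hq => hGkey q (hmemSK q hq))
          [] (pgm.getD p0 []) p0 hpt.2 (by simp [hg0])
      have hAfold : (p0 :: pt).foldl (pvStepA pgm mg) ([], [], none)
          = pt.foldl (pvStepA pgm mg) ([], pgm.getD p0 [], some p0) := by
        rw [List.foldl_cons]
        have : pvStepA pgm mg ([], [], none) p0 = ([], pgm.getD p0 [], some p0) := by
          simp [pvStepA]
        rw [this]
      have hcur : (pt.foldl (pvStepA pgm mg) ([], pgm.getD p0 [], some p0)).2.1 ≠ [] :=
        pv_stepA_cur_ne pgm mg pt (fun q hq => hGne q (hmemSK q hq))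
          [] (pgm.getD p0 []) p0 (by simp [hg0])
      -- B's spans = A's spans
      have hspans :
          pvChunks mg (PySem.List.sorted (neurons.map (fun n => (pvKeyB n, n))) (fun t => t.1) false)
            = (if ((PySem.List.sorted pgm.keys (fun p => p) false).foldl (pvStepA pgm mg) ([], [], none)).2.1 ≠ []
               then ((PySem.List.sorted pgm.keys (fun p => p) false).foldl (pvStepA pgm mg) ([], [], none)).1
                    ++ [((PySem.List.sorted pgm.keys (fun p => p) false).foldl (pvStepA pgm mg) ([], [], none)).2.1]
               else ((PySem.List.sorted pgm.keys (fun p => p) false).foldl (pvStepA pgm mg) ([], [], none)).1) := by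
        rw [pv_sorted_map_dec, pv_chunks_eq_finish mg _ (by
          rw [Ne, PySem.List.sorted_eq_nil_iff]; exact hnil)]
        have hkb : PySem.List.sorted neurons pvKeyB false = PySem.List.sorted neurons pvPosA false := by
          rw [pvKeyB_eq_pvPosA]
        rw [hkb, hsorted, hSK, hBfold, hpositions, hSK, hAfold, if_pos hcur]
        simp [pvFinish]
      rw [hspans]
      -- the merge loops agree, and so do the final length tests
      set spansA := (if ((PySem.List.sorted pgm.keys (fun p => p) false).foldl (pvStepA pgm mg) ([], [], none)).2.1 ≠ []
               then ((PySem.List.sorted pgm.keys (fun p => p) false).foldl (pvStepA pgm mg) ([], [], none)).1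
                    ++ [((PySem.List.sorted pgm.keys (fun p => p) false).foldl (pvStepA pgm mg) ([], [], none)).2.1]
               else ((PySem.List.sorted pgm.keys (fun p => p) false).foldl (pvStepA pgm mg) ([], [], none)).1) with hspansdef
      have hres : spansA.foldl (pvMerge mgs) [] = (spansA.foldl (pvCollect mgs) []).map pvFlat := by
        have := pv_merge_eq_map_flat mgs spansA []
        simpa using this
      rw [hres]
      have hlen : ((spansA.foldl (pvCollect mgs) []).map pvFlat).length
          = (spansA.foldl (pvCollect mgs) []).length := by simp
      by_cases hfin : ((spansA.foldl (pvCollect mgs) []).length : Int) ≤ 1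
      · rw [if_neg (show ¬ 1 < (((spansA.foldl (pvCollect mgs) []).map pvFlat).length : Int) by rw [hlen]; omega),
          if_pos hfin]
      · rw [if_pos (show 1 < (((spansA.foldl (pvCollect mgs) []).map pvFlat).length : Int) by rw [hlen]; omega),
          if_neg hfin]
        simp [pvFlat]

-- ===== VERDICT (by name: the statement is the Claim_ definition above) =====
theorem split_by_position_spec : Claim_equal_split_by_position := by
  intro neurons mgs mg _
  exact split_by_position_main neurons mgs mg
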